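-- pv_equiv track=rewrite | github.com/sepandhaghighi/pyextract | html_ext.py | find_video_tag
-- ===== SOURCE A (Python) =====
-- video_type=[".mp4",".3gp",".wmv",".flv",".mkv",".swf"]
--
-- def find_video_tag(string):
--     link_list=[]
--     for i in range(len(video_type)):
--         index=0
--         while(index!=-1):
--             index=string.find(video_type[i],index)
--             if index!=-1:
--                 link_list.append(index)
--                 index=index+4
--     return link_list
-- ===== SOURCE B (Python) =====
-- video_type = [".mp4", ".3gp", ".wmv", ".flv", ".mkv", ".swf"]
--
-- def find_video_tag(string):
--     buckets = {}
--     for i in range(len(string)):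
--         buckets.setdefault(string[i:i+4], []).append(i)
--     link_list = []
--     for ext in video_type:
--         link_list += buckets.get(ext, [])
--     return link_list
-- ===== Notes on version B (the rewrite author's own statement) =====
-- stated objective: alternative
-- what changed: Replaces six separate str.find scans (one per extension, stepping by 4) with a single pass over all positions that buckets each 4-char window index into a dict keyed by the window, then concatenates the six buckets in video_type order.
import Mathlib
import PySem

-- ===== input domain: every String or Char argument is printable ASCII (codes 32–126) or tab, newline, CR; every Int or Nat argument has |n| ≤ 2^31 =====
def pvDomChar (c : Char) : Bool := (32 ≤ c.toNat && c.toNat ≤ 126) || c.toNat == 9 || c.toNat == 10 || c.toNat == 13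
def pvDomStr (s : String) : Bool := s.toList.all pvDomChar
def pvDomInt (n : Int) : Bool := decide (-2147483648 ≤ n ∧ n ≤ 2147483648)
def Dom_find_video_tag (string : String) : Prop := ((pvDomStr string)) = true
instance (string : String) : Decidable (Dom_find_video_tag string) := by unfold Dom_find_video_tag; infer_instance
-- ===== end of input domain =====

-- B replaces A's six repeated str.find scans by one pass that buckets every 4-char window
-- index into a dict keyed by the window, concatenated in video_type order (alternative algorithm).

-- module-level constant of both Pythons
def pvVideoType : List String := [".mp4", ".3gp", ".wmv", ".flv", ".mkv", ".swf"]

-- ===== PORT A =====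
-- A's inner 'while index != -1' loop for one extension; fuel (s.length + 1) only makes the
-- recursion structural — it is never exhausted before the Python loop exits.
def pvFindLoop (s ext : List Char) (fuel : Nat) (index : Int) : List Int :=
  match fuel with
  | 0 => []
  | fuel + 1 =>
    let j := PySem.Chars.findFrom s ext index none
    if j = -1 then [] else j :: pvFindLoop s ext fuel (j + 4)

def find_video_tag (string : String) : List Int :=
  pvVideoType.foldl
    (fun link_list ext => link_list ++ pvFindLoop string.toList ext.toList (string.toList.length + 1) 0)
    []

-- ===== PORT B =====
def find_video_tag_alt (string : String) : List Int :=
  let s := string.toList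
  let buckets : PySem.Dict (List Char) (List Int) :=
    (PySem.List.pyRange 0 s.length 1).foldl
      (fun d i => d.modify (PySem.List.slice s (some i) (some (i + 4))) [] (· ++ [i]))
      PySem.Dict.empty
  pvVideoType.foldl (fun link_list ext => link_list ++ buckets.getD ext.toList []) []

-- ===== PRECONDITION & SPEC =====
def Spec_find_video_tag (string : String) (out : List Int) : Prop := out = find_video_tag_alt string
instance (string : String) (out : List Int) : Decidable (Spec_find_video_tag string out) := by unfold Spec_find_video_tag; infer_instance

-- ===== CLAIM (what is proved, stated in full; the proofs are below) =====
def Claim_equal_find_video_tag : Prop := ∀ (string : String), Dom_find_video_tag string → Spec_find_video_tag string (find_video_tag string)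

-- ===== LEMMAS AND PROOFS =====

-- the common characterisation: indices i ∈ [0, len) whose 4-char window equals ext
def pvMatches (s ext : List Char) (a : Int) : List Int :=
  (PySem.List.pyRange a s.length 1).filter
    (fun i => PySem.List.slice s (some i) (some (i + 4)) == ext)

-- window-at-n equals ext iff ext is a prefix of s.drop n (for |ext| = 4)
lemma pv_window_iff (s ext : List Char) (hlen : ext.length = 4) (n : Nat) :
    (PySem.List.slice s (some (n : Int)) (some ((n : Int) + 4)) == ext) = true ↔
      ext <+: s.drop n := by
  have h4 : ((n : Int) + 4) = ((n : Int) + ((4 : Nat) : Int)) := by norm_num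
  rw [h4, PySem.List.slice_natCast_add, beq_iff_eq, List.prefix_iff_eq_take, hlen]
  exact eq_comm

-- first char of each of the six extensions occurs only at position 0 ⇒ matches never self-overlap
lemma pv_no_overlap (ext t : List Char) (hlen : ext.length = 4)
    (hfc : ∀ i : Nat, 0 < i → i < 4 → ext.getD i ' ' ≠ ext.getD 0 ' ')
    (m : Nat) (hm1 : 0 < m) (hm3 : m < 4)
    (h1 : ext <+: t) (h2 : ext <+: t.drop m) : False := by
  have hlt : t.length ≥ 4 := by
    have := h1.length_le; omega
  have e1 : ext[m]'(by omega) = t[m]'(by omega) := h1.getElem (by omega)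
  have e2 : ext[0]'(by omega) = (t.drop m)[0]'(by simp; omega) := h2.getElem (by omega)
  have e3 : (t.drop m)[0]'(by simp; omega) = t[m]'(by omega) := by
    simp [List.getElem_drop]
  apply hfc m hm1 hm3
  rw [List.getD_eq_getElem ext ' ' (by omega), List.getD_eq_getElem ext ' ' (by omega),
    e1, ← e3, ← e2]

-- findFrom past the end of the string is -1
lemma pv_findFrom_past (s ext : List Char) (k : Int) (hk : (s.length : Int) < k) :
    PySem.Chars.findFrom s ext k none = -1 := by
  simp only [PySem.Chars.findFrom]
  have h1 : ¬ k < 0 := by omega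
  simp [h1, if_pos (by omega : (s.length : Int) < k)]

-- A's per-extension loop computes exactly the sorted match positions
lemma pv_loop_eq (s ext : List Char) (hlen : ext.length = 4)
    (hfc : ∀ i : Nat, 0 < i → i < 4 → ext.getD i ' ' ≠ ext.getD 0 ' ') :
    ∀ (fuel k : Nat), s.length + 1 ≤ fuel + k →
      pvFindLoop s ext fuel (k : Int) = pvMatches s ext (k : Int) := by
  intro fuel
  induction fuel with
  | zero =>
    intro k hk
    show ([] : List Int) = _
    rw [pvMatches, PySem.List.pyRange_one_eq_nil (by exact_mod_cast by omega), List.filter_nil]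
  | succ fuel ih =>
    intro k hk
    by_cases hks : k ≤ s.length
    case neg =>
      -- k past the end: find gives -1, range is empty
      simp only [pvFindLoop, pvMatches]
      rw [pv_findFrom_past s ext _ (by exact_mod_cast by omega), if_pos rfl]
      rw [PySem.List.pyRange_one_eq_nil (by exact_mod_cast by omega), List.filter_nil]
    case pos =>
      simp only [pvFindLoop]
      set j := PySem.Chars.findFrom s ext (k : Int) none with hj
      by_cases hj1 : j = -1
      · -- no more matches
        rw [if_pos hj1]
        have hnin : ¬ ext <:+: s.drop k :=
          (PySem.Chars.findFrom_natCast_eq_neg_one_iff s ext k hks).mp hj1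
        symm
        rw [pvMatches, List.filter_eq_nil_iff]
        intro i hi
        have hmem := (PySem.List.mem_pyRange_one).mp hi
        intro hslice
        have hi0 : i = ((i.toNat : Nat) : Int) := by omega
        rw [hi0] at hslice
        have hpre : ext <+: s.drop i.toNat := (pv_window_iff s ext hlen i.toNat).mp hslice
        apply hnin
        rw [← PySem.Chars.isIn_iff_infix, ← PySem.Chars.exists_prefix_drop_iff_isIn]
        refine ⟨i.toNat - k, ?_⟩
        rw [List.drop_drop]
        have : k + (i.toNat - k) = i.toNat := by omega
        rw [this]; exact hpre
      · -- a match at j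
        simp only [if_neg hj1]
        obtain ⟨hkj, hpre, hmin⟩ := PySem.Chars.findFrom_natCast_spec s ext k hks hj1
        have hj0 : 0 ≤ j := le_trans (by exact_mod_cast Int.natCast_nonneg k) hkj
        have hjlen : j.toNat + 4 ≤ s.length := by
          have := hpre.length_le
          simp at this
          omega
        have hjcast : j = ((j.toNat : Nat) : Int) := by omega
        -- split the range at j and at j+4
        rw [pvMatches,
          PySem.List.pyRange_one_append (k : Int) j (s.length : Int) hkj (by omega),
          PySem.List.pyRange_one_append j (j + 4) (s.length : Int) (by omega) (by omega),
          List.filter_append, List.filter_append]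
        -- [k, j): no matches
        have hfilt1 : (PySem.List.pyRange (k : Int) j 1).filter
            (fun i => PySem.List.slice s (some i) (some (i + 4)) == ext) = [] := by
          rw [List.filter_eq_nil_iff]
          intro i hi hslice
          have hmem := (PySem.List.mem_pyRange_one).mp hi
          have hi0 : i = ((i.toNat : Nat) : Int) := by omega
          rw [hi0] at hslice
          exact hmin i.toNat (by omega) (by omega) ((pv_window_iff s ext hlen i.toNat).mp hslice)
        -- [j, j+4): exactly j
        have hrange4 : PySem.List.pyRange j (j + 4) 1 = [j, j + 1, j + 2, j + 3] := by
          rw [PySem.List.pyRange_one_cons (by omega), PySem.List.pyRange_one_cons (by omega),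
            PySem.List.pyRange_one_cons (by omega), PySem.List.pyRange_one_cons (by omega),
            PySem.List.pyRange_one_eq_nil (by omega)]
          norm_num
          omega
        have hmatch : (PySem.List.slice s (some j) (some (j + 4)) == ext) = true := by
          rw [hjcast]
          exact (pv_window_iff s ext hlen j.toNat).mpr hpre
        have hnom : ∀ m : Int, 0 < m → m < 4 →
            (PySem.List.slice s (some (j + m)) (some (j + m + 4)) == ext) = false := by
          intro m hm1 hm4
          rw [Bool.eq_false_iff]
          intro hsl
          have hc : j + m = (((j.toNat + m.toNat : Nat) : Nat) : Int) := by omega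
          rw [hc] at hsl
          have hpre2 : ext <+: s.drop (j.toNat + m.toNat) := (pv_window_iff s ext hlen _).mp hsl
          rw [← List.drop_drop] at hpre2
          exact pv_no_overlap ext (s.drop j.toNat) hlen hfc m.toNat (by omega) (by omega) hpre hpre2
        have hfilt2 : (PySem.List.pyRange j (j + 4) 1).filter
            (fun i => PySem.List.slice s (some i) (some (i + 4)) == ext) = [j] := by
          rw [hrange4]
          have h1 := hnom 1 (by omega) (by omega)
          have h2 := hnom 2 (by omega) (by omega)
          have h3 := hnom 3 (by omega) (by omega)
          simp [hmatch, h1, h2, h3]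
        rw [hfilt1, hfilt2]
        -- tail: IH from j+4
        have hcast : j + 4 = (((j.toNat + 4 : Nat) : Nat) : Int) := by omega
        rw [hcast, ih (j.toNat + 4) (by omega)]
        simp [pvMatches]

-- B's bucket for a key equals the filtered index list
lemma pv_bucket_eq (s : List Char) (ext : List Char) :
    ((PySem.List.pyRange 0 (s.length : Int) 1).foldl
      (fun d i => d.modify (PySem.List.slice s (some i) (some (i + 4))) [] (· ++ [i]))
      PySem.Dict.empty).getD ext [] = pvMatches s ext 0 := by
  have hmap : (PySem.List.pyRange 0 (s.length : Int) 1).foldl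
      (fun d i => d.modify (PySem.List.slice s (some i) (some (i + 4))) [] (· ++ [i]))
      PySem.Dict.empty
      = ((PySem.List.pyRange 0 (s.length : Int) 1).map
          (fun i => (PySem.List.slice s (some i) (some (i + 4)), i))).foldl
        (fun d p => d.modify p.1 [] (· ++ [p.2])) PySem.Dict.empty := by
    rw [List.foldl_map]
  rw [hmap, PySem.Dict.getD_foldl_modify_append, PySem.Dict.getD_empty, List.filter_map]
  simp [pvMatches, Function.comp_def]

-- the six extensions: length 4 and first char unique (supplies pv_loop_eq's hypotheses)
lemma pv_ext_props (ext : String) (hext : ext ∈ pvVideoType) :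
    ext.toList.length = 4 ∧
      (∀ i : Nat, 0 < i → i < 4 → ext.toList.getD i ' ' ≠ ext.toList.getD 0 ' ') := by
  fin_cases hext <;> refine ⟨by decide, ?_⟩ <;>
    (intro i h0 hi; interval_cases i <;> decide)

-- ===== VERDICT (by name: the statement is the Claim_ definition above) =====
theorem find_video_tag_spec : Claim_equal_find_video_tag := by
  intro string _
  unfold Spec_find_video_tag find_video_tag find_video_tag_alt
  apply PySem.List.foldl_congr_mem
  intro acc ext hmem
  obtain ⟨hlen, hfc⟩ := pv_ext_props ext hmem
  congr 1
  rw [pv_bucket_eq string.toList ext.toList]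
  have := pv_loop_eq string.toList ext.toList hlen hfc (string.toList.length + 1) 0 (by omega)
  simpa using this
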